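-- pv_equiv track=rewrite | github.com/missionpinball/mpf | mpf/wire/fast/boards.py | fastConnectorBlock
-- ===== SOURCE A (Python) =====
-- def fastConnectorBlock(prefix, size, vclass, offset, keyLoc, firstGround):
--     pins = []
--     nonKeys = 0
--     for pin in range(size):
--         if pin == keyLoc:
--             pins.append(("KEY",-1))
--         elif pin >= firstGround:
--             pins.append(("GND",0))
--         else:
--             pins.append((prefix+(str(nonKeys+offset)), vclass))
--             nonKeys += 1
--     return pins
-- ===== SOURCE B (Python) =====
-- def fastConnectorBlock(prefix, size, vclass, offset, keyLoc, firstGround):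
--     n = max(size, 0)
--     g = min(max(firstGround, 0), n)          # pins 0..g-1 are the signal zone
--     keyInSig = 0 <= keyLoc < g
--     nsig = g - 1 if keyInSig else g          # number of signal entries
--     pins = [(prefix + str(i + offset), vclass) for i in range(nsig)]
--     pins += [("GND", 0)] * (n - g)
--     if keyInSig:
--         pins.insert(keyLoc, ("KEY", -1))
--     elif g <= keyLoc < n:
--         pins[keyLoc] = ("KEY", -1)
--     return pins
-- ===== Notes on version B (the rewrite author's own statement) =====
-- stated objective: alternative
-- what changed: Replaces A's single stateful loop with a three-way branch per pin by a segmented construction: compute closed-form zone sizes, build the signal segment and the ground segment as whole lists, then splice the single KEY in by insert (signal zone) or index assignment (ground zone).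
import Mathlib
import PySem

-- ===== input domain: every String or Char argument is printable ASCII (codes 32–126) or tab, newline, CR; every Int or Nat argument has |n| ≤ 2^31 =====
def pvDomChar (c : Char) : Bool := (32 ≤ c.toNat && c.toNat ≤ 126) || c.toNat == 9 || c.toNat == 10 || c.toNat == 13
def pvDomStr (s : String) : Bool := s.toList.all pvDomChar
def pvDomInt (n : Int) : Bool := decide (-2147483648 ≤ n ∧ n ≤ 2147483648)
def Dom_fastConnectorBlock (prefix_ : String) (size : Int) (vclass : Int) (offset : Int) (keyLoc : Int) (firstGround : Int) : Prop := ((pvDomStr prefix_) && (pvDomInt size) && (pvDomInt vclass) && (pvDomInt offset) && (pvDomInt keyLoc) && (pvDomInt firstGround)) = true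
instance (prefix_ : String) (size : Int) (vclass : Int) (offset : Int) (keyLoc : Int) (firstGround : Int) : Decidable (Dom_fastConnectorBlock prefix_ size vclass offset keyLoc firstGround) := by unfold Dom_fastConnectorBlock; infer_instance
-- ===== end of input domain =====

-- B replaces A's stateful per-pin loop by a segmented construction: it computes the
-- signal-zone size in closed form, builds the signal and ground segments as whole
-- lists, and splices the single KEY entry in by insert / index assignment;
-- objective: alternative (same O(n) cost).

-- ===== PORT A =====
def fastConnectorBlock (prefix_ : String) (size : Int) (vclass : Int) (offset : Int) (keyLoc : Int) (firstGround : Int) : List (String × Int) :=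
  ((PySem.List.pyRange 0 size 1).foldl
    (fun (st : List (String × Int) × Int) pin =>
      if pin = keyLoc then (st.1 ++ [("KEY", -1)], st.2)
      else if pin ≥ firstGround then (st.1 ++ [("GND", 0)], st.2)
      else (st.1 ++ [(prefix_ ++ PySem.Int.toStr (st.2 + offset), vclass)], st.2 + 1))
    ([], 0)).1

-- ===== PORT B =====
def fastConnectorBlock_alt (prefix_ : String) (size : Int) (vclass : Int) (offset : Int) (keyLoc : Int) (firstGround : Int) : List (String × Int) :=
  let n : Int := max size 0
  let g : Int := min (max firstGround 0) n
  let keyInSig : Bool := decide (0 ≤ keyLoc ∧ keyLoc < g)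
  let nsig : Int := if keyInSig then g - 1 else g
  let pins : List (String × Int) :=
    ((PySem.List.pyRange 0 nsig 1).map (fun i => (prefix_ ++ PySem.Int.toStr (i + offset), vclass)))
    ++ PySem.List.pyRepeat [(("GND", 0) : String × Int)] (n - g)
  if keyInSig then PySem.List.insert pins keyLoc ("KEY", -1)
  else if g ≤ keyLoc ∧ keyLoc < n then PySem.List.pySetD pins keyLoc ("KEY", -1)
  else pins

-- ===== PRECONDITION & SPEC =====
def Spec_fastConnectorBlock (prefix_ : String) (size : Int) (vclass : Int) (offset : Int) (keyLoc : Int) (firstGround : Int) (out : List (String × Int)) : Prop := out = fastConnectorBlock_alt prefix_ size vclass offset keyLoc firstGround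
instance (prefix_ : String) (size : Int) (vclass : Int) (offset : Int) (keyLoc : Int) (firstGround : Int) (out : List (String × Int)) : Decidable (Spec_fastConnectorBlock prefix_ size vclass offset keyLoc firstGround out) := by unfold Spec_fastConnectorBlock; infer_instance

-- ===== CLAIM (what is proved, stated in full; the proofs are below) =====
def Claim_equal_fastConnectorBlock : Prop := ∀ (prefix_ : String) (size : Int) (vclass : Int) (offset : Int) (keyLoc : Int) (firstGround : Int), Dom_fastConnectorBlock prefix_ size vclass offset keyLoc firstGround → Spec_fastConnectorBlock prefix_ size vclass offset keyLoc firstGround (fastConnectorBlock prefix_ size vclass offset keyLoc firstGround)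

-- ===== LEMMAS AND PROOFS =====

-- number of signal (non-key, non-ground) pins among 0..n-1, = A's nonKeys counter
def sigCount (keyLoc firstGround : Int) (n : Nat) : Int :=
  ((List.range n).countP (fun k => decide ((k : Int) ≠ keyLoc) && decide ((k : Int) < firstGround)) : Nat)

lemma sigCount_succ (keyLoc firstGround : Int) (m : Nat) :
    sigCount keyLoc firstGround (m + 1) =
      sigCount keyLoc firstGround m + (if (m : Int) ≠ keyLoc ∧ (m : Int) < firstGround then 1 else 0) := by
  simp only [sigCount, List.range_succ]
  by_cases hk : (m : Int) = keyLoc <;> by_cases hg : (m : Int) < firstGround <;>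
    simp [hk, hg]

lemma sigCount_closed (keyLoc firstGround : Int) (n : Nat) (h : (n : Int) < firstGround) :
    sigCount keyLoc firstGround n = (n : Int) - (if 0 ≤ keyLoc ∧ keyLoc < (n : Int) then 1 else 0) := by
  induction n with
  | zero => simp [sigCount]
  | succ m ih =>
    have hm : (m : Int) < firstGround := by push_cast at h ⊢; omega
    have hih := ih hm
    rw [sigCount_succ]
    rw [hih]
    push_cast
    by_cases hk : (m : Int) = keyLoc <;> simp [hk, hm] <;> split_ifs <;> omega

lemma loopA (prefix_ : String) (vclass offset keyLoc firstGround : Int) (n : Nat) :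
    (List.foldl
      (fun (st : List (String × Int) × Int) pin =>
        if pin = keyLoc then (st.1 ++ [("KEY", -1)], st.2)
        else if pin ≥ firstGround then (st.1 ++ [("GND", 0)], st.2)
        else (st.1 ++ [(prefix_ ++ PySem.Int.toStr (st.2 + offset), vclass)], st.2 + 1))
      ([], 0) ((List.range n).map (fun (k : Nat) => (k : Int)))) =
    ((List.range n).map (fun (k : Nat) =>
        if (k : Int) = keyLoc then (("KEY", -1) : String × Int)
        else if (k : Int) ≥ firstGround then ("GND", 0)
        else (prefix_ ++ PySem.Int.toStr ((k : Int) - (if 0 ≤ keyLoc ∧ keyLoc < (k : Int) then 1 else 0) + offset), vclass)),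
      sigCount keyLoc firstGround n) := by
  induction n with
  | zero => simp [sigCount]
  | succ m ih =>
    rw [List.range_succ, List.map_append, List.map_append, List.foldl_append, ih]
    simp only [List.map_cons, List.map_nil, List.foldl_cons, List.foldl_nil]
    rw [sigCount_succ]
    by_cases hk : (m : Int) = keyLoc
    · simp [hk]
    · by_cases hg : firstGround ≤ (m : Int)
      · have h2 : ¬ (m : Int) < firstGround := by omega
        simp [hk, hg, h2]
      · have hmf : (m : Int) < firstGround := by omega
        have hc := sigCount_closed keyLoc firstGround m hmf
        simp [hk, hg, hmf, hc]

-- the per-pin closed form (A's loop, after loopA) equals B's segmented construction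
lemma segEq (prefix_ : String) (size vclass offset keyLoc firstGround : Int) :
    ((List.range size.toNat).map (fun (k : Nat) =>
        if (k : Int) = keyLoc then (("KEY", -1) : String × Int)
        else if (k : Int) ≥ firstGround then ("GND", 0)
        else (prefix_ ++ PySem.Int.toStr ((k : Int) - (if 0 ≤ keyLoc ∧ keyLoc < (k : Int) then 1 else 0) + offset), vclass))) =
    fastConnectorBlock_alt prefix_ size vclass offset keyLoc firstGround := by
  have hmax : max size 0 = ((size.toNat : Nat) : Int) := (Int.ofNat_toNat size).symm
  simp only [fastConnectorBlock_alt, hmax]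
  set N := size.toNat with hN
  set g : Int := min (max firstGround 0) ((N : Nat) : Int) with hg
  have hg0 : 0 ≤ g := le_min (le_max_right _ _) (Int.natCast_nonneg N)
  set G := g.toNat with hG
  have hgG : g = (G : Int) := (Int.toNat_of_nonneg hg0).symm
  have hGN : G ≤ N := by have h1 : g ≤ (N : Int) := min_le_right _ _; omega
  have hfg1 : ∀ k : Nat, k < G → (k : Int) < firstGround := by intro k hk; omega
  have hfg2 : ∀ k : Nat, G ≤ k → k < N → firstGround ≤ (k : Int) := by intro k hk1 hk2; omega
  by_cases hks : 0 ≤ keyLoc ∧ keyLoc < g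
  · -- key inside the signal zone: B inserts KEY at keyLoc
    have hb : decide (0 ≤ keyLoc ∧ keyLoc < g) = true := by simpa using hks
    simp only [hb, if_true]
    have hK : keyLoc = ((keyLoc.toNat : Nat) : Int) := (Int.toNat_of_nonneg hks.1).symm
    set K := keyLoc.toNat with hKdef
    have hKG : K < G := by omega
    have hrange : PySem.List.pyRange 0 (g - 1) 1 = (List.range (G - 1)).map (fun k => ((k : Nat) : Int)) := by
      rw [PySem.List.pyRange_one]
      have h1 : (g - 1 - 0).toNat = G - 1 := by omega
      rw [h1]; simp
    rw [hrange, List.map_map, PySem.List.pyRepeat_singleton]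
    have hrep : ((N : Int) - g).toNat = N - G := by omega
    rw [hrep]
    have hKlen : K ≤ ((List.range (G - 1)).map ((fun i => (prefix_ ++ PySem.Int.toStr (i + offset), vclass)) ∘ fun k => ((k : Nat) : Int)) ++ List.replicate (N - G) (("GND", 0) : String × Int)).length := by
      simp; omega
    rw [hK, PySem.List.insert_natCast _ K _ hKlen]
    apply List.ext_getElem?
    intro j
    simp only [List.getElem?_map, List.getElem?_range, List.getElem?_append, List.getElem?_take,
      List.getElem?_drop, List.getElem?_replicate, List.length_take, List.length_append,
      List.length_map, List.length_range, List.length_replicate, List.length_cons,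
      Function.comp, Option.map_eq_map]
    have hmin : min K (G - 1 + (N - G)) = K := by omega
    by_cases h1 : j < K
    · have hjN : j < N := by omega
      have hjG1 : j < G - 1 := by omega
      have hne : ¬ ((j : Int) = (K : Int)) := by omega
      have hfg : (j : Int) < firstGround := hfg1 j (by omega)
      have hind : ¬ ((0:Int) ≤ (K : Int) ∧ (K : Int) < (j : Int)) := by omega
      rw [if_pos (show j < min K (G - 1 + (N - G)) by omega), if_pos h1, if_pos hjG1]
      simp [List.getElem?_range, hjN, hjG1, hne, hfg, hind,
        show j ≠ K from by omega, show ¬ K < j from by omega,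
        show ¬ firstGround ≤ (j : Int) from by omega]
    · by_cases h2 : j = K
      · subst h2
        have hKN : K < N := by omega
        rw [if_neg (by omega : ¬ (K < min K (G - 1 + (N - G)))), hmin]
        simp [List.getElem?_range, hKN]
      · -- j > K
        have hjK : K < j := by omega
        have hcons : j - K = (j - K - 1) + 1 := by omega
        rw [if_neg (by omega : ¬ (j < min K (G - 1 + (N - G)))), hmin, hcons, List.getElem?_cons_succ,
          List.getElem?_drop, List.getElem?_append]
        have hidx : K + (j - K - 1) = j - 1 := by omega
        rw [hidx]
        by_cases h3 : j < G
        · have hjN : j < N := by omega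
          have hjG1 : j - 1 < G - 1 := by omega
          have hne : ¬ ((j : Int) = (K : Int)) := by omega
          have hfg : (j : Int) < firstGround := hfg1 j (by omega)
          have hind : (0:Int) ≤ (K : Int) ∧ (K : Int) < (j : Int) := by omega
          rw [if_pos (by simpa using hjG1)]
          simp [List.getElem?_range, hjN, hjG1, hne, hfg, hind]
          rw [if_neg (show ¬ j = K from by omega), if_neg (show ¬ firstGround ≤ (j:Int) from by omega),
            if_pos (show K < j from by omega)]
          have harg : ((j:Int) - 1 + offset) = (((j - 1 : Nat) : Int) + offset) := by
            push_cast [Nat.cast_sub (show 1 ≤ j from by omega)]; ring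
          rw [harg]
        · by_cases h4 : j < N
          · have hge : firstGround ≤ (j : Int) := hfg2 j (by omega) h4
            have hne : ¬ ((j : Int) = (K : Int)) := by omega
            rw [if_neg (by simp; omega)]
            simp [List.getElem?_range, h4, hne, hge, List.getElem?_replicate,
              show j ≠ K from by omega, show j - 1 - (G - 1) < N - G from by omega]
          · rw [if_neg (by simp; omega)]
            simp [List.getElem?_range, h4]
            omega
  · -- key not in the signal zone
    have hb : decide (0 ≤ keyLoc ∧ keyLoc < g) = false := by simpa using hks
    simp only [hb, Bool.false_eq_true, if_false]
    have hrange : PySem.List.pyRange 0 g 1 = (List.range G).map (fun k => ((k : Nat) : Int)) := by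
      rw [PySem.List.pyRange_one]
      have h1 : (g - 0).toNat = G := by omega
      rw [h1]; simp
    rw [hrange, List.map_map, PySem.List.pyRepeat_singleton]
    have hrep : ((N : Int) - g).toNat = N - G := by omega
    rw [hrep]
    by_cases hk2 : g ≤ keyLoc ∧ keyLoc < ((N : Nat) : Int)
    · -- key in the ground zone: B overwrites one GND entry
      rw [if_pos hk2]
      have hK : keyLoc = ((keyLoc.toNat : Nat) : Int) := (Int.toNat_of_nonneg (le_trans hg0 hk2.1)).symm
      set K := keyLoc.toNat with hKdef
      have hGK : G ≤ K := by omega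
      have hKN : K < N := by omega
      rw [hK, PySem.List.pySetD_natCast]
      apply List.ext_getElem?
      intro j
      simp only [List.getElem?_map, List.getElem?_set, List.getElem?_append,
        List.getElem?_replicate, List.length_append, List.length_map, List.length_range,
        List.length_replicate]
      by_cases h1 : j = K
      · subst h1
        simp [List.getElem?_range, hKN, show ¬ K < G from by omega]
        omega
      · rw [if_neg (by omega : ¬ K = j)]
        by_cases h2 : j < G
        · have hjN : j < N := by omega
          have hne : ¬ ((j : Int) = (K : Int)) := by omega
          have hfg : (j : Int) < firstGround := hfg1 j h2
          have hind : ¬ ((0:Int) ≤ (K : Int) ∧ (K : Int) < (j : Int)) := by omega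
          simp [List.getElem?_range, hjN, h2, hne,
            show ¬ firstGround ≤ (j:Int) from by omega, show ¬ K < j from by omega,
            show j ≠ K from h1]
        · by_cases h3 : j < N
          · have hge : firstGround ≤ (j : Int) := hfg2 j (by omega) h3
            simp [List.getElem?_range, h3, h2, show j ≠ K from h1,
              show j - G < N - G from by omega, hge]
          · simp [List.getElem?_range, h3, h2, show ¬ j - G < N - G from by omega]
    · -- no key at all
      rw [if_neg hk2]
      apply List.ext_getElem?
      intro j
      simp only [List.getElem?_map, List.getElem?_append, List.getElem?_replicate,
        List.length_append, List.length_map, List.length_range, List.length_replicate]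
      have hkey : keyLoc < 0 ∨ ((N : Nat) : Int) ≤ keyLoc := by omega
      by_cases h2 : j < G
      · have hjN : j < N := by omega
        have hne : ¬ ((j : Int) = keyLoc) := by omega
        have hfg : (j : Int) < firstGround := hfg1 j h2
        have hind : ¬ ((0:Int) ≤ keyLoc ∧ keyLoc < (j : Int)) := by omega
        simp [List.getElem?_range, hjN, h2, hne, hind,
          show ¬ firstGround ≤ (j:Int) from by omega]
      · by_cases h3 : j < N
        · have hge : firstGround ≤ (j : Int) := hfg2 j (by omega) h3
          have hne : ¬ ((j : Int) = keyLoc) := by omega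
          simp [List.getElem?_range, h3, h2, hne, hge, show j - G < N - G from by omega]
        · simp [List.getElem?_range, h3, h2, show ¬ j - G < N - G from by omega]

-- ===== VERDICT (by name: the statement is the Claim_ definition above) =====
theorem fastConnectorBlock_spec : Claim_equal_fastConnectorBlock := by
  intro prefix_ size vclass offset keyLoc firstGround _
  unfold Spec_fastConnectorBlock fastConnectorBlock
  rw [PySem.List.pyRange_one]
  simp only [Int.sub_zero, zero_add]
  rw [loopA prefix_ vclass offset keyLoc firstGround (size.toNat)]
  exact segEq prefix_ size vclass offset keyLoc firstGround
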